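-- pv_equiv track=rewrite | github.com/mayank-mishra-1/IdentifyingDisasterTweets | DataProcessing/processData.py | tokenizeString
-- ===== SOURCE A (Python) =====
-- def tokenizeString(tweet):
--     wordsInTweet = []
--     currWord = ""
--     for i in tweet:
--         if(i == ' ' or i == '.' or i == '?' or i == '!'):
--             wordsInTweet.append(currWord)
--             currWord = ""
--         else:
--             currWord += i
--     return wordsInTweet
-- ===== SOURCE B (Python) =====
-- def tokenizeString(tweet):
--     parts = tweet.translate(str.maketrans('.?!', '   ')).split(' ')
--     return parts[:-1]
-- ===== Notes on version B (the rewrite author's own statement) =====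
-- stated objective: faster
-- what changed: Replaces the character-by-character Python-level accumulator loop with one translate of the three punctuation delimiters to spaces followed by a single library split on the space character, dropping the final segment (which A never emits).
import Mathlib
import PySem

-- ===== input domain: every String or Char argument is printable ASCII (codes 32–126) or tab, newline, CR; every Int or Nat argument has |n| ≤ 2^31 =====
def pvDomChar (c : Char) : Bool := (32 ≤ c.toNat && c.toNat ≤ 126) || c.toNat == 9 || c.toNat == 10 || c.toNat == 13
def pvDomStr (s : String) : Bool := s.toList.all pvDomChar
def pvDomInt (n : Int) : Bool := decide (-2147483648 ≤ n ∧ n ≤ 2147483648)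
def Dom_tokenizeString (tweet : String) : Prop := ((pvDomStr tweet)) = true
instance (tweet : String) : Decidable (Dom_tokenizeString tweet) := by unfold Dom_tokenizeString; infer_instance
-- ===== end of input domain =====

-- B replaces A's character-by-character accumulator loop with translate-delimiters-to-space + one library split + drop of the last segment (same O(n), measured faster by constant factor: C-level split vs Python-level loop).


-- ===== PORT A =====
def tokenizeString (tweet : String) : List String :=
  (tweet.toList.foldl
    (fun (st : List String × String) i =>
      if i = ' ' ∨ i = '.' ∨ i = '?' ∨ i = '!' then (st.1 ++ [st.2], "")
      else (st.1, st.2.push i))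
    ([], "")).1

-- ===== PORT B =====
-- tweet.translate(str.maketrans('.?!', '   ')) — a per-character substitution
def pvTranslate (c : Char) : Char := if c = '.' ∨ c = '?' ∨ c = '!' then ' ' else c

def tokenizeString_alt (tweet : String) : List String :=
  let parts := (PySem.Chars.splitOn (tweet.toList.map pvTranslate) [' ']).map String.ofList
  parts.dropLast

-- ===== PRECONDITION & SPEC =====
def Spec_tokenizeString (tweet : String) (out : List String) : Prop := out = tokenizeString_alt tweet
instance (tweet : String) (out : List String) : Decidable (Spec_tokenizeString tweet out) := by unfold Spec_tokenizeString; infer_instance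

-- ===== CLAIM (what is proved, stated in full; the proofs are below) =====
def Claim_equal_tokenizeString : Prop := ∀ (tweet : String), Dom_tokenizeString tweet → Spec_tokenizeString tweet (tokenizeString tweet)

-- ===== LEMMAS AND PROOFS =====

-- spec form of splitting a char list on ' ' with an open current segment
def pvToks : List Char → List Char → List (List Char)
  | [], cur => [cur]
  | x :: rest, cur => if x = ' ' then cur :: pvToks rest [] else pvToks rest (cur ++ [x])

lemma pvToks_ne_nil (l cur : List Char) : pvToks l cur ≠ [] := by
  induction l generalizing cur with
  | nil => simp [pvToks]
  | cons x rest ih => by_cases h : x = ' ' <;> simp [pvToks, h, ih]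

lemma splitOn_go_single (fuel : Nat) (l cur : List Char) (acc : List (List Char))
    (h : l.length ≤ fuel) :
    PySem.Chars.splitOn.go [' '] fuel l cur acc = acc.reverse ++ pvToks l cur.reverse := by
  induction fuel generalizing l cur acc with
  | zero =>
    have : l = [] := by cases l <;> simp_all
    subst this
    simp [PySem.Chars.splitOn.go, pvToks]
  | succ fuel ih =>
    cases l with
    | nil => simp [PySem.Chars.splitOn.go, pvToks]
    | cons c rest =>
      by_cases hc : c = ' '
      · subst hc
        rw [show PySem.Chars.splitOn.go [' '] (fuel+1) (' ' :: rest) cur acc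
              = PySem.Chars.splitOn.go [' '] fuel rest [] (cur.reverse :: acc) by
            simp [PySem.Chars.splitOn.go, List.isPrefixOf]]
        rw [ih rest [] (cur.reverse :: acc) (by simpa using Nat.le_of_succ_le_succ (by simpa using h))]
        simp [pvToks]
      · rw [show PySem.Chars.splitOn.go [' '] (fuel+1) (c :: rest) cur acc
              = PySem.Chars.splitOn.go [' '] fuel rest (c :: cur) acc by
            simp [PySem.Chars.splitOn.go, List.isPrefixOf, show ¬(' ' = c) from fun hh => hc hh.symm]]
        rw [ih rest (c :: cur) acc (by simpa using Nat.le_of_succ_le_succ (by simpa using h))]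
        simp [pvToks, hc]

lemma splitOn_single (l : List Char) :
    PySem.Chars.splitOn l [' '] = pvToks l [] := by
  have := splitOn_go_single (l.length + 1) l [] [] (by omega)
  simpa [PySem.Chars.splitOn] using this

-- spec form of A's loop
def pvTokA : List Char → String → List String
  | [], _ => []
  | i :: rest, cur =>
    if i = ' ' ∨ i = '.' ∨ i = '?' ∨ i = '!' then cur :: pvTokA rest "" else pvTokA rest (cur.push i)

lemma foldlA_eq (cs : List Char) (ws : List String) (cur : String) :
    (cs.foldl
      (fun (st : List String × String) i =>
        if i = ' ' ∨ i = '.' ∨ i = '?' ∨ i = '!' then (st.1 ++ [st.2], "")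
        else (st.1, st.2.push i))
      (ws, cur)).1 = ws ++ pvTokA cs cur := by
  induction cs generalizing ws cur with
  | nil => simp [pvTokA]
  | cons i rest ih =>
    by_cases h : i = ' ' ∨ i = '.' ∨ i = '?' ∨ i = '!'
    · simp [pvTokA, h, List.foldl_cons, ih]
    · simp [pvTokA, h, List.foldl_cons, ih]

lemma tokA_eq_toks (cs : List Char) (cur : String) :
    pvTokA cs cur = ((pvToks (cs.map pvTranslate) cur.toList).map String.ofList).dropLast := by
  induction cs generalizing cur with
  | nil => simp [pvTokA, pvToks]
  | cons i rest ih =>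
    by_cases h : i = ' ' ∨ i = '.' ∨ i = '?' ∨ i = '!'
    · have htr : pvTranslate i = ' ' := by
        rcases h with h | h | h | h <;> simp [pvTranslate, h]
      have hne : (pvToks (rest.map pvTranslate) []).map String.ofList ≠ [] := by
        simp [pvToks_ne_nil]
      rw [show pvTokA (i :: rest) cur = cur :: pvTokA rest "" from by simp [pvTokA, h],
          show pvToks ((i :: rest).map pvTranslate) cur.toList
              = cur.toList :: pvToks (rest.map pvTranslate) [] from by simp [htr, pvToks],
          List.map_cons, List.dropLast_cons_of_ne_nil hne, ih]
      simp [String.ofList_toList]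
    · have htr : pvTranslate i = i := by
        simp only [pvTranslate, ite_eq_right_iff]
        intro hd
        exact absurd (Or.inr hd) h
      have hns : ¬ i = ' ' := fun hh => h (Or.inl hh)
      rw [show pvTokA (i :: rest) cur = pvTokA rest (cur.push i) from by simp [pvTokA, h],
          show pvToks ((i :: rest).map pvTranslate) cur.toList
              = pvToks (rest.map pvTranslate) (cur.toList ++ [i]) from by
            simp [htr, pvToks, hns],
          ih, String.toList_push]

-- ===== VERDICT (by name: the statement is the Claim_ definition above) =====
theorem tokenizeString_spec : Claim_equal_tokenizeString := by
  intro tweet _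
  show tokenizeString tweet = tokenizeString_alt tweet
  unfold tokenizeString tokenizeString_alt
  rw [foldlA_eq, splitOn_single]
  simpa using tokA_eq_toks tweet.toList ""
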